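-- pv_equiv track=rewrite | github.com/tuhlopuz1/fotochemistry | src/utils.py | debug
-- ===== SOURCE A (Python) =====
-- def debug(v1):
--
--
--
--
--     lt = [0]*len(v1)
--     v1 = [char for char in v1]
--
--     x = 0
--     while x <= len(v1)-2:
--         if v1[x].isalpha() and v1[x] == v1[x].lower():
--             if v1[x+1].isalpha() and v1[x+1] == v1[x+1].lower():
--
--                 v1[x] = v1[x].upper()
--                 x+=1
--         x += 1
--
--
--     for x in range(len(v1)-1):
--         if v1[x].isdigit():
--             v1[x+1] = v1[x+1].upper()
--
--     v1[0] = v1[0].upper()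
--
--
--
--
--     v1 = ''.join(v1)
--     return v1
-- ===== SOURCE B (Python) =====
-- def debug(v1):
--     # Single left-to-right pass. A character is uppercased iff it is the first
--     # character, or follows a digit, or sits at an even offset inside a maximal
--     # run of lowercase letters and is not that run's last character (this is
--     # exactly the greedy non-overlapping pairing). 'parity' is the offset parity
--     # inside the current lowercase run; it resets on any non-lowercase char.
--     n = len(v1)
--     out = []
--     parity = 0
--     prev = ''
--     for i, ch in enumerate(v1):
--         low = ch.isalpha() and ch == ch.lower()
--         nxt = v1[i + 1] if i + 1 < n else ''
--         up = (i == 0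
--               or prev.isdigit()
--               or (low and parity == 0 and nxt.isalpha() and nxt == nxt.lower()))
--         out.append(ch.upper() if up else ch)
--         parity = (parity + 1) % 2 if low else 0
--         prev = ch
--     return ''.join(out)
-- ===== Notes on version B (the rewrite author's own statement) =====
-- stated objective: alternative
-- what changed: A makes three in-place mutation passes over a char list (a while loop that greedily uppercases adjacent lowercase pairs skipping by 2, a range loop uppercasing digit successors, then the first char); B is a single left-to-right pass with a run-parity automaton: a char is uppercased iff it is first, follows a digit, or sits at an even offset of a maximal lowercase run and is not its last char, which is provably the same greedy pairing.
import Mathlib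
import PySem

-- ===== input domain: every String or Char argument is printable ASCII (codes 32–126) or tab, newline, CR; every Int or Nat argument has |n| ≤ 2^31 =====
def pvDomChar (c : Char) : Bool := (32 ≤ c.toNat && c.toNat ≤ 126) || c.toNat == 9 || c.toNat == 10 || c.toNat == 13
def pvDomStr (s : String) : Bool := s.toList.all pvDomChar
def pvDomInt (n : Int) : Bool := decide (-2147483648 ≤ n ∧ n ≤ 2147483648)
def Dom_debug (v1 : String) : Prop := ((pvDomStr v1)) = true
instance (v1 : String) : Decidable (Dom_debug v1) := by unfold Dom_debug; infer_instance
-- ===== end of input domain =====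

-- B replaces A's three in-place mutation passes by ONE left-to-right pass with a
-- run-parity automaton (objective: alternative decomposition; return value only).

-- ===== PORT A =====
-- A's while loop over the mutable char list; indices x, x+1 are always in range when read
-- (guard 'x <= len(v1)-2' over Python ints is x + 2 ≤ cs.length over Nat), so getD is exact.
def debugLoopA (cs : List Char) (x : Nat) : List Char :=
  if x + 2 ≤ cs.length then
    if PySem.Chars.isalpha (cs.getD x ' ') && (cs.getD x ' ' == PySem.Chars.lowerChar (cs.getD x ' ')) then
      if PySem.Chars.isalpha (cs.getD (x+1) ' ') && (cs.getD (x+1) ' ' == PySem.Chars.lowerChar (cs.getD (x+1) ' ')) then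
        debugLoopA (cs.set x (PySem.Chars.upperChar (cs.getD x ' '))) (x + 2)
      else debugLoopA cs (x + 1)
    else debugLoopA cs (x + 1)
  else cs
termination_by cs.length - x
decreasing_by
  · simp only [List.length_set]; omega
  · omega
  · omega

-- A's 'for x in range(len(v1)-1)' digit pass; x and x+1 are in range, getD is exact there.
def debugDigitsA (cs : List Char) : List Char :=
  (List.range (cs.length - 1)).foldl
    (fun v x => if PySem.Chars.isdigit (v.getD x ' ')
                then v.set (x+1) (PySem.Chars.upperChar (v.getD (x+1) ' ')) else v) cs

-- 'v1[0] = v1[0].upper()' raises IndexError on the empty string: excluded by Pre_debug.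
def debug (v1 : String) : String :=
  let v := debugDigitsA (debugLoopA v1.toList 0)
  String.mk (v.set 0 (PySem.Chars.upperChar (v.getD 0 ' ')))

-- ===== PORT B =====
-- B's single for loop: i = position, parity = offset parity in the current lowercase run,
-- prev = previous char (Python's initial '' is none here: ''.isdigit() is False).
-- 'nxt = v1[i+1] if i+1 < n else '' ' is the Option nxt; '' fails isalpha, i.e. none → false.
def altGo (cs : List Char) (n : Nat) (rest : List Char) (i : Nat) (parity : Nat) (prev : Option Char) : List Char :=
  match rest with
  | [] => []
  | ch :: rest' =>
    let low := PySem.Chars.isalpha ch && (ch == PySem.Chars.lowerChar ch)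
    let nxt : Option Char := if i + 1 < n then some (cs.getD (i+1) ' ') else none
    let up := (i == 0) ||
      (match prev with | some p => PySem.Chars.isdigit p | none => false) ||
      (low && (parity == 0) &&
        (match nxt with
         | some c => PySem.Chars.isalpha c && (c == PySem.Chars.lowerChar c)
         | none => false))
    (if up then PySem.Chars.upperChar ch else ch) ::
      altGo cs n rest' (i+1) (if low then (parity+1) % 2 else 0) (some ch)

def debug_alt (v1 : String) : String :=
  String.mk (altGo v1.toList v1.toList.length v1.toList 0 0 none)

-- ===== PRECONDITION & SPEC =====
-- Pre_ excludes only the empty string, on which A raises IndexError (v1[0] on []).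
def Pre_debug (v1 : String) : Prop := v1 ≠ ""
instance (v1 : String) : Decidable (Pre_debug v1) := by unfold Pre_debug; infer_instance
def pvWitness_debug : String := "ab1cD"

def Spec_debug (v1 : String) (out : String) : Prop := out = debug_alt v1
instance (v1 : String) (out : String) : Decidable (Spec_debug v1 out) := by unfold Spec_debug; infer_instance

-- ===== CLAIM (what is proved, stated in full; the proofs are below) =====
def Claim_equal_debug : Prop := ∀ (v1 : String), Dom_debug v1 → Pre_debug v1 → Spec_debug v1 (debug v1)

-- ===== LEMMAS AND PROOFS =====

-- character-level facts
theorem charRange (lo hi : Char) (c : Char) (a b : Nat) (hlo : lo.toNat = a) (hhi : hi.toNat = b) :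
    (decide (lo ≤ c) && decide (c ≤ hi)) = decide (a ≤ c.toNat ∧ c.toNat ≤ b) := by
  have hval : ∀ x y : Char, (x ≤ y) ↔ x.toNat ≤ y.toNat := by
    intro x y; rw [Char.le_def]; exact UInt32.le_iff_toNat_le
  subst hlo hhi
  by_cases h1 : lo ≤ c <;> by_cases h2 : c ≤ hi <;> simp_all

theorem islower_eq' (c : Char) : PySem.Chars.islower c = decide (97 ≤ c.toNat ∧ c.toNat ≤ 122) :=
  charRange 'a' 'z' c 97 122 rfl rfl
theorem isupper_eq' (c : Char) : PySem.Chars.isupper c = decide (65 ≤ c.toNat ∧ c.toNat ≤ 90) :=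
  charRange 'A' 'Z' c 65 90 rfl rfl
theorem isdigit_eq' (c : Char) : PySem.Chars.isdigit c = decide (48 ≤ c.toNat ∧ c.toNat ≤ 57) :=
  charRange '0' '9' c 48 57 rfl rfl

theorem toNat_upperChar (c : Char) (hl : PySem.Chars.islower c = true) :
    (PySem.Chars.upperChar c).toNat = c.toNat - 32 := by
  rw [islower_eq', decide_eq_true_eq] at hl
  have hvalid : (c.toNat - 32).isValidChar := by constructor; omega
  rw [PySem.Chars.upperChar, islower_eq', if_pos (by simpa using hl),
      Char.toNat_ofNat, if_pos hvalid]

theorem upperChar_of_not_lower (c : Char) (hl : PySem.Chars.islower c = false) :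
    PySem.Chars.upperChar c = c := by
  rw [PySem.Chars.upperChar, hl]; simp

theorem toNat_lowerChar (c : Char) (hu : PySem.Chars.isupper c = true) :
    (PySem.Chars.lowerChar c).toNat = c.toNat + 32 := by
  rw [isupper_eq', decide_eq_true_eq] at hu
  have hvalid : (c.toNat + 32).isValidChar := by constructor; omega
  rw [PySem.Chars.lowerChar, isupper_eq', if_pos (by simpa using hu),
      Char.toNat_ofNat, if_pos hvalid]

theorem lowerChar_of_not_upper (c : Char) (hu : PySem.Chars.isupper c = false) :
    PySem.Chars.lowerChar c = c := by
  rw [PySem.Chars.lowerChar, hu]; simp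

-- 'c.isalpha() and c == c.lower()' equals 'c.isalpha() and c.islower()'
theorem condEq (c : Char) :
    (PySem.Chars.isalpha c && (c == PySem.Chars.lowerChar c)) = (PySem.Chars.isalpha c && PySem.Chars.islower c) := by
  by_cases hl : PySem.Chars.islower c
  · have hu : PySem.Chars.isupper c = false := by
      rw [islower_eq', decide_eq_true_eq] at hl
      rw [isupper_eq', decide_eq_false_iff_not]; omega
    rw [lowerChar_of_not_upper c hu, hl]
    simp
  · simp only [Bool.not_eq_true] at hl
    by_cases hu : PySem.Chars.isupper c
    · have hne : c ≠ PySem.Chars.lowerChar c := by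
        intro e
        have h1 : c.toNat = (PySem.Chars.lowerChar c).toNat := by rw [← e]
        rw [toNat_lowerChar c hu] at h1; omega
      rw [hl, beq_eq_false_iff_ne.mpr hne]
    · simp only [Bool.not_eq_true] at hu
      simp [PySem.Chars.isalpha, hl, hu]

theorem isdigit_upperChar (c : Char) : PySem.Chars.isdigit (PySem.Chars.upperChar c) = PySem.Chars.isdigit c := by
  by_cases hl : PySem.Chars.islower c
  · have h1 := toNat_upperChar c hl
    have h2 := hl
    rw [islower_eq', decide_eq_true_eq] at h2
    rw [isdigit_eq', isdigit_eq', h1]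
    rw [decide_eq_decide]; omega
  · simp only [Bool.not_eq_true] at hl
    rw [upperChar_of_not_lower c hl]

theorem upperChar_idem (c : Char) : PySem.Chars.upperChar (PySem.Chars.upperChar c) = PySem.Chars.upperChar c := by
  by_cases hl : PySem.Chars.islower c
  · have h1 := toNat_upperChar c hl
    have h2 := hl
    rw [islower_eq', decide_eq_true_eq] at h2
    have h3 : PySem.Chars.islower (PySem.Chars.upperChar c) = false := by
      rw [islower_eq', h1, decide_eq_false_iff_not]; omega
    rw [upperChar_of_not_lower _ h3]
  · simp only [Bool.not_eq_true] at hl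
    rw [upperChar_of_not_lower c hl, upperChar_of_not_lower c hl]

-- 'char at j is a lowercase letter'
def lowB (cs : List Char) (j : Nat) : Bool :=
  PySem.Chars.isalpha (cs.getD j ' ') && PySem.Chars.islower (cs.getD j ' ')

-- B's run-parity automaton: offset parity inside the current maximal lowercase run
def par (cs : List Char) : Nat → Nat
  | 0 => 0
  | i+1 => if lowB cs i then (par cs i + 1) % 2 else 0

-- the condition under which position j ends up uppercased
def bcond (cs : List Char) (j : Nat) : Bool :=
  (j == 0) || (decide (0 < j) && PySem.Chars.isdigit (cs.getD (j-1) ' ')) ||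
  (lowB cs j && (par cs j == 0) && (decide (j+1 < cs.length) && lowB cs (j+1)))

-- the greedy pair-start index list A's while loop realises
def pairs (cs : List Char) (x : Nat) : List Nat :=
  if x + 1 < cs.length then
    if lowB cs x && lowB cs (x+1) then
      x :: pairs cs (x + 2)
    else pairs cs (x + 1)
  else []
termination_by cs.length - x

theorem pairs_ge (cs : List Char) (x : Nat) : ∀ j ∈ pairs cs x, x ≤ j := by
  fun_induction pairs cs x with
  | case1 x h hc ih =>
      intro j hj
      rcases List.mem_cons.mp hj with hj | hj
      · omega
      · have := ih j hj; omega
  | case2 x h hc ih =>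
      intro j hj
      have := ih j hj; omega
  | case3 x h =>
      intro j hj
      simp at hj

theorem pairs_congr (n : Nat) : ∀ (cs cs' : List Char) (x : Nat), cs.length - x ≤ n →
    cs'.length = cs.length → (∀ j, x ≤ j → cs'.getD j ' ' = cs.getD j ' ') →
    pairs cs' x = pairs cs x := by
  induction n with
  | zero =>
      intro cs cs' x hn hlen hagree
      have h2 : ¬ (x + 1 < cs.length) := by omega
      conv_lhs => rw [pairs]
      conv_rhs => rw [pairs]
      rw [hlen, if_neg h2, if_neg h2]
  | succ n ih =>
      intro cs cs' x hn hlen hagree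
      conv_lhs => rw [pairs]
      conv_rhs => rw [pairs]
      have e1 : lowB cs' x = lowB cs x := by rw [lowB, lowB, hagree x (by omega)]
      have e2 : lowB cs' (x+1) = lowB cs (x+1) := by rw [lowB, lowB, hagree (x+1) (by omega)]
      rw [hlen, e1, e2]
      by_cases hg : x + 1 < cs.length
      · rw [if_pos hg, if_pos hg]
        by_cases hc : (lowB cs x && lowB cs (x+1))
        · rw [if_pos hc, if_pos hc, ih cs cs' (x+2) (by omega) hlen (fun j hj => hagree j (by omega))]
        · rw [if_neg hc, if_neg hc, ih cs cs' (x+1) (by omega) hlen (fun j hj => hagree j (by omega))]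
      · rw [if_neg hg, if_neg hg]

theorem loopA_length (cs : List Char) (x : Nat) : (debugLoopA cs x).length = cs.length := by
  fun_induction debugLoopA cs x with
  | case1 cs x h hc1 hc2 ih => rw [ih, List.length_set]
  | case2 cs x h hc1 hc2 ih => exact ih
  | case3 cs x h hc1 ih => exact ih
  | case4 cs x h => rfl

theorem loopA_getD (cs : List Char) (x : Nat) : ∀ (j : Nat),
    (debugLoopA cs x).getD j ' ' =
      if j ∈ pairs cs x then PySem.Chars.upperChar (cs.getD j ' ') else cs.getD j ' ' := by
  fun_induction debugLoopA cs x with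
  | case1 cs x h hc1 hc2 ih =>
      intro j
      have hcnd : (lowB cs x && lowB cs (x+1)) = true := by
        rw [condEq] at hc1 hc2
        rw [lowB, lowB, hc1, hc2]
        rfl
      have hpairs : pairs cs x = x :: pairs cs (x+2) := by
        rw [pairs, if_pos (by omega), if_pos hcnd]
      have hcongr : pairs (cs.set x (PySem.Chars.upperChar (cs.getD x ' '))) (x+2) = pairs cs (x+2) := by
        apply pairs_congr cs.length _ _ _ (by omega) (by rw [List.length_set])
        intro j hj
        rw [List.getD_eq_getElem?_getD, List.getElem?_set_ne (by omega), ← List.getD_eq_getElem?_getD]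
      rw [ih j, hcongr, hpairs]
      by_cases hjx : j = x
      · subst hjx
        have hnot : j ∉ pairs cs (j+2) := fun hm => by have := pairs_ge cs (j+2) j hm; omega
        rw [if_neg hnot, if_pos (List.mem_cons_self), List.getD_eq_getElem?_getD,
            List.getElem?_set_self (by omega), List.getD_eq_getElem?_getD]
        simp [List.getElem?_eq_getElem (show j < cs.length by omega)]
      · have hset : (cs.set x (PySem.Chars.upperChar (cs.getD x ' '))).getD j ' ' = cs.getD j ' ' := by
          rw [List.getD_eq_getElem?_getD, List.getElem?_set_ne (by omega), ← List.getD_eq_getElem?_getD]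
        rw [hset]
        have : (j ∈ x :: pairs cs (x+2)) ↔ (j ∈ pairs cs (x+2)) := by
          simp [List.mem_cons, hjx]
        by_cases hm : j ∈ pairs cs (x+2)
        · rw [if_pos hm, if_pos (this.mpr hm)]
        · rw [if_neg hm, if_neg (fun hh => hm (this.mp hh))]
  | case2 cs x h hc1 hc2 ih =>
      intro j
      have hcnd : (lowB cs x && lowB cs (x+1)) = false := by
        rw [condEq] at hc1
        simp only [Bool.not_eq_true] at hc2
        rw [condEq] at hc2
        rw [lowB, lowB, hc2]
        simp
      have hpairs : pairs cs x = pairs cs (x+1) := by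
        rw [pairs, if_pos (by omega), if_neg (by rw [hcnd]; simp)]
      rw [ih j, hpairs]
  | case3 cs x h hc1 ih =>
      intro j
      have hcnd : (lowB cs x && lowB cs (x+1)) = false := by
        simp only [Bool.not_eq_true] at hc1
        rw [condEq] at hc1
        rw [lowB, lowB, hc1]
        simp
      have hpairs : pairs cs x = pairs cs (x+1) := by
        rw [pairs, if_pos (by omega), if_neg (by rw [hcnd]; simp)]
      rw [ih j, hpairs]
  | case4 cs x h =>
      intro j
      have hpairs : pairs cs x = [] := by
        rw [pairs, if_neg (by omega)]
      rw [hpairs]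
      simp

theorem digitsA_core (cs : List Char) (k : Nat) (hk : k ≤ cs.length - 1) :
    ((List.range k).foldl (fun v x => if PySem.Chars.isdigit (v.getD x ' ')
        then v.set (x+1) (PySem.Chars.upperChar (v.getD (x+1) ' ')) else v) cs).length = cs.length ∧
    ∀ j, ((List.range k).foldl (fun v x => if PySem.Chars.isdigit (v.getD x ' ')
        then v.set (x+1) (PySem.Chars.upperChar (v.getD (x+1) ' ')) else v) cs).getD j ' ' =
      if 0 < j ∧ j ≤ k ∧ PySem.Chars.isdigit (cs.getD (j-1) ' ') = true
      then PySem.Chars.upperChar (cs.getD j ' ') else cs.getD j ' ' := by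
  induction k with
  | zero =>
      refine ⟨rfl, fun j => ?_⟩
      rw [List.range_zero, List.foldl_nil, if_neg (by omega)]
  | succ k ih =>
      obtain ⟨ihl, ihg⟩ := ih (by omega)
      simp only [List.range_succ, List.foldl_append, List.foldl_cons, List.foldl_nil]
      have hdigw : PySem.Chars.isdigit (((List.range k).foldl (fun v x => if PySem.Chars.isdigit (v.getD x ' ')
          then v.set (x+1) (PySem.Chars.upperChar (v.getD (x+1) ' ')) else v) cs).getD k ' ')
          = PySem.Chars.isdigit (cs.getD k ' ') := by
        rw [ihg k]
        by_cases hc : 0 < k ∧ k ≤ k ∧ PySem.Chars.isdigit (cs.getD (k-1) ' ') = true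
        · rw [if_pos hc, isdigit_upperChar]
        · rw [if_neg hc]
      by_cases hd : PySem.Chars.isdigit (cs.getD k ' ') = true
      · rw [hdigw.trans hd |> if_pos]
        refine ⟨by rw [List.length_set, ihl], fun j => ?_⟩
        by_cases hjk : j = k + 1
        · subst hjk
          rw [List.getD_eq_getElem?_getD, List.getElem?_set_self (by rw [ihl]; omega),
              Option.getD_some, ihg (k+1), if_neg (by omega),
              if_pos ⟨by omega, by omega, by rw [Nat.add_sub_cancel]; exact hd⟩]
        · rw [List.getD_eq_getElem?_getD, List.getElem?_set_ne (fun e => hjk e.symm),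
              ← List.getD_eq_getElem?_getD, ihg j]
          by_cases hc : 0 < j ∧ j ≤ k ∧ PySem.Chars.isdigit (cs.getD (j-1) ' ') = true
          · rw [if_pos hc, if_pos ⟨hc.1, by omega, hc.2.2⟩]
          · rw [if_neg hc, if_neg (fun hh => hc ⟨hh.1, by omega, hh.2.2⟩)]
      · rw [if_neg (fun hh => hd (hdigw.symm.trans hh))]
        refine ⟨ihl, fun j => ?_⟩
        rw [ihg j]
        by_cases hc : 0 < j ∧ j ≤ k ∧ PySem.Chars.isdigit (cs.getD (j-1) ' ') = true
        · rw [if_pos hc, if_pos ⟨hc.1, by omega, hc.2.2⟩]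
        · rw [if_neg hc, if_neg ?_]
          intro hh
          by_cases hjk : j ≤ k
          · exact hc ⟨hh.1, hjk, hh.2.2⟩
          · have hj1 : j = k + 1 := by omega
            rw [hj1, Nat.add_sub_cancel] at hh
            exact hd hh.2.2

theorem digitsA_length (cs : List Char) : (debugDigitsA cs).length = cs.length := by
  rw [debugDigitsA]
  exact (digitsA_core cs (cs.length - 1) (Nat.le_refl _)).1

theorem digitsA_getD (cs : List Char) (j : Nat) :
    (debugDigitsA cs).getD j ' ' =
      if 0 < j ∧ j ≤ cs.length - 1 ∧ PySem.Chars.isdigit (cs.getD (j-1) ' ') = true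
      then PySem.Chars.upperChar (cs.getD j ' ') else cs.getD j ' ' := by
  rw [debugDigitsA]
  exact (digitsA_core cs (cs.length - 1) (Nat.le_refl _)).2 j

-- the greedy pair starts are exactly the lowercase pairs at parity 0 of the automaton
theorem pairs_iff_par (cs : List Char) (x : Nat)
    (hinv : par cs x = 0 ∨ lowB cs x = false) (j : Nat) :
    j ∈ pairs cs x ↔ x ≤ j ∧ j + 1 < cs.length ∧ lowB cs j = true ∧ lowB cs (j+1) = true ∧ par cs j = 0 := by
  fun_induction pairs cs x with
  | case1 x h hc ih =>
      simp only [Bool.and_eq_true] at hc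
      obtain ⟨hl1, hl2⟩ := hc
      have hp0 : par cs x = 0 := by
        rcases hinv with h' | h'
        · exact h'
        · rw [hl1] at h'; cases h'
      have hp1 : par cs (x+1) = 1 := by rw [par, if_pos hl1, hp0]
      have hp2 : par cs (x+2) = 0 := by
        rw [show x+2 = (x+1)+1 from rfl, par]
        by_cases hx : lowB cs (x+1)
        · rw [if_pos hx, hp1]
        · rw [if_neg hx]
      rw [List.mem_cons, ih (Or.inl hp2)]
      constructor
      · rintro (rfl | ⟨h1, h2, h3, h4, h5⟩)
        · exact ⟨Nat.le_refl _, h, hl1, hl2, hp0⟩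
        · exact ⟨by omega, h2, h3, h4, h5⟩
      · rintro ⟨h1, h2, h3, h4, h5⟩
        by_cases hjx : j = x
        · exact Or.inl hjx
        · by_cases hjx1 : j = x + 1
          · subst hjx1; rw [hp1] at h5; cases h5
          · exact Or.inr ⟨by omega, h2, h3, h4, h5⟩
  | case2 x h hc ih =>
      have hinv' : par cs (x+1) = 0 ∨ lowB cs (x+1) = false := by
        by_cases hx : lowB cs x
        · right
          cases hx1 : lowB cs (x+1)
          · rfl
          · rw [hx, hx1] at hc; simp at hc
        · left; rw [par, if_neg (by simpa using hx)]
      rw [ih hinv']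
      constructor
      · rintro ⟨h1, h2, h3, h4, h5⟩
        exact ⟨by omega, h2, h3, h4, h5⟩
      · rintro ⟨h1, h2, h3, h4, h5⟩
        by_cases hjx : j = x
        · subst hjx; rw [h3, h4] at hc; simp at hc
        · exact ⟨by omega, h2, h3, h4, h5⟩
  | case3 x h =>
      simp only [List.not_mem_nil, false_iff]
      rintro ⟨h1, h2, h3, h4, h5⟩
      omega

-- A's result list is the bcond-directed map
theorem main_list (cs : List Char) (h0 : cs ≠ []) :
    (debugDigitsA (debugLoopA cs 0)).set 0
        (PySem.Chars.upperChar ((debugDigitsA (debugLoopA cs 0)).getD 0 ' ')) =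
      (List.range' 0 cs.length).map
        (fun j => if bcond cs j then PySem.Chars.upperChar (cs.getD j ' ') else cs.getD j ' ') := by
  have hn : 0 < cs.length := List.length_pos_of_ne_nil h0
  have hD1 := loopA_getD cs 0
  have hD1len := loopA_length cs 0
  have hdig : ∀ i, PySem.Chars.isdigit ((debugLoopA cs 0).getD i ' ')
      = PySem.Chars.isdigit (cs.getD i ' ') := by
    intro i; rw [hD1 i]
    by_cases hp : i ∈ pairs cs 0
    · rw [if_pos hp, isdigit_upperChar]
    · rw [if_neg hp]
  have hD2 : ∀ j, j < cs.length → (debugDigitsA (debugLoopA cs 0)).getD j ' ' =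
      if (0 < j ∧ PySem.Chars.isdigit (cs.getD (j-1) ' ') = true) ∨ j ∈ pairs cs 0
      then PySem.Chars.upperChar (cs.getD j ' ') else cs.getD j ' ' := by
    intro j hj
    rw [digitsA_getD, hD1len, hdig (j-1), hD1 j]
    by_cases hq : 0 < j ∧ PySem.Chars.isdigit (cs.getD (j-1) ' ') = true
    · rw [if_pos ⟨hq.1, by omega, hq.2⟩]
      by_cases hp : j ∈ pairs cs 0
      · rw [if_pos hp, upperChar_idem, if_pos (Or.inl hq)]
      · rw [if_neg hp, if_pos (Or.inl hq)]
    · rw [if_neg (fun hh => hq ⟨hh.1, hh.2.2⟩)]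
      by_cases hp : j ∈ pairs cs 0
      · rw [if_pos hp, if_pos (Or.inr hp)]
      · rw [if_neg hp, if_neg (fun hh => hh.elim hq hp)]
  have hbc : ∀ j, bcond cs j = true ↔
      (j = 0 ∨ (0 < j ∧ PySem.Chars.isdigit (cs.getD (j-1) ' ') = true) ∨ j ∈ pairs cs 0) := by
    intro j
    rw [bcond, pairs_iff_par cs 0 (Or.inl rfl) j]
    simp only [Bool.or_eq_true, Bool.and_eq_true, beq_iff_eq, decide_eq_true_eq]
    constructor
    · rintro ((h | ⟨h1, h2⟩) | ⟨⟨h3, h5⟩, h2, h4⟩)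
      · exact Or.inl h
      · exact Or.inr (Or.inl ⟨h1, h2⟩)
      · exact Or.inr (Or.inr ⟨Nat.zero_le _, h2, h3, h4, h5⟩)
    · rintro (h | ⟨h1, h2⟩ | ⟨-, h2, h3, h4, h5⟩)
      · exact Or.inl (Or.inl h)
      · exact Or.inl (Or.inr ⟨h1, h2⟩)
      · exact Or.inr ⟨⟨h3, h5⟩, h2, h4⟩
  apply List.ext_getElem
  · rw [List.length_set, digitsA_length, hD1len, List.length_map, List.length_range']
  · intro j h1 h2
    have hj : j < cs.length := by
      rw [List.length_set, digitsA_length, hD1len] at h1; exact h1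
    rw [List.getElem_map]
    have hjr : (List.range' 0 cs.length)[j]'(by simpa using hj) = j := by
      simp [List.getElem_range']
    rw [hjr, ← List.getD_eq_getElem _ ' ' h1]
    by_cases hb : bcond cs j = true
    · rw [if_pos hb]
      rcases (hbc j).mp hb with h | h | h
      · subst h
        rw [List.getD_eq_getElem?_getD,
            List.getElem?_set_self (by rw [digitsA_length, hD1len]; exact hn),
            Option.getD_some, hD2 0 hn]
        by_cases hp : (0 : Nat) ∈ pairs cs 0
        · rw [if_pos (Or.inr hp), upperChar_idem]
        · rw [if_neg (fun hh => hh.elim (fun q => by omega) hp)]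
      · have hz : j ≠ 0 := by omega
        rw [List.getD_eq_getElem?_getD, List.getElem?_set_ne (fun e => hz e.symm),
            ← List.getD_eq_getElem?_getD, hD2 j hj, if_pos (Or.inl h)]
      · by_cases hz : j = 0
        · subst hz
          rw [List.getD_eq_getElem?_getD,
              List.getElem?_set_self (by rw [digitsA_length, hD1len]; exact hn),
              Option.getD_some, hD2 0 hn, if_pos (Or.inr h), upperChar_idem]
        · rw [List.getD_eq_getElem?_getD, List.getElem?_set_ne (fun e => hz e.symm),
              ← List.getD_eq_getElem?_getD, hD2 j hj, if_pos (Or.inr h)]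
    · rw [if_neg hb]
      have hfacts := (fun hh => hb ((hbc j).mpr hh))
      have hz : j ≠ 0 := fun e => hfacts (Or.inl e)
      rw [List.getD_eq_getElem?_getD, List.getElem?_set_ne (fun e => hz e.symm),
          ← List.getD_eq_getElem?_getD, hD2 j hj,
          if_neg (fun hh => hfacts (Or.inr hh))]

-- B's loop computes the same bcond-directed map
theorem altGo_eq (cs : List Char) : ∀ (rest : List Char) (i : Nat), rest = cs.drop i →
    altGo cs cs.length rest i (par cs i) (if i = 0 then none else some (cs.getD (i-1) ' ')) =
      (List.range' i rest.length).map
        (fun j => if bcond cs j then PySem.Chars.upperChar (cs.getD j ' ') else cs.getD j ' ') := by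
  intro rest
  induction rest with
  | nil => intro i _; simp [altGo]
  | cons ch rest' ih =>
      intro i hdrop
      have hi : i < cs.length := by
        by_contra hge
        rw [List.drop_eq_nil_of_le (by omega)] at hdrop
        cases hdrop
      have hsplit : cs.drop i = cs[i] :: cs.drop (i+1) := List.drop_eq_getElem_cons hi
      rw [hsplit] at hdrop
      injection hdrop with hch hrest
      have hget : cs.getD i ' ' = ch := by rw [List.getD_eq_getElem _ ' ' hi, hch]
      simp only [altGo]
      have hlow : (PySem.Chars.isalpha ch && (ch == PySem.Chars.lowerChar ch)) = lowB cs i := by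
        rw [condEq, lowB, hget]
      have hup : ((i == 0) ||
          (match (if i = 0 then none else some (cs.getD (i-1) ' ')) with
           | some p => PySem.Chars.isdigit p | none => false) ||
          ((PySem.Chars.isalpha ch && (ch == PySem.Chars.lowerChar ch)) && (par cs i == 0) &&
            (match (if i + 1 < cs.length then some (cs.getD (i+1) ' ') else none) with
             | some c => PySem.Chars.isalpha c && (c == PySem.Chars.lowerChar c)
             | none => false))) = bcond cs i := by
        rw [hlow, bcond]
        by_cases h0 : i = 0
        · subst h0
          by_cases h1 : 0 + 1 < cs.length
          · rw [if_pos h1, if_pos rfl]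
            simp [condEq, lowB, h1]
          · rw [if_neg h1, if_pos rfl]
            simp [h1]
        · rw [if_neg h0]
          by_cases h1 : i + 1 < cs.length
          · rw [if_pos h1]
            simp [condEq, lowB, h1, Nat.pos_of_ne_zero h0]
          · rw [if_neg h1]
            simp [h1, Nat.pos_of_ne_zero h0]
      have hpar : (if (PySem.Chars.isalpha ch && (ch == PySem.Chars.lowerChar ch)) = true
          then (par cs i + 1) % 2 else 0) = par cs (i+1) := by
        rw [hlow, par]
      have hprev : (some ch : Option Char) = (if i + 1 = 0 then none else some (cs.getD ((i+1)-1) ' ')) := by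
        rw [if_neg (by omega), Nat.add_sub_cancel, hget]
      rw [hup, hpar, hprev, ih (i+1) hrest]
      have hlen : rest'.length + 1 = (ch :: rest').length := rfl
      rw [← hlen, List.range'_succ, List.map_cons, hget]

-- ===== VERDICT (by name: the statement is the Claim_ definition above) =====
theorem debug_spec : Claim_equal_debug := by
  unfold Claim_equal_debug
  intro v1 _ hpre
  unfold Spec_debug debug debug_alt
  apply congrArg String.mk
  have h0 : v1.toList ≠ [] := fun e => hpre (String.toList_eq_nil_iff.mp e)
  have hB := altGo_eq v1.toList v1.toList 0 (by rw [List.drop_zero])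
  rw [if_pos rfl] at hB
  rw [main_list v1.toList h0, ← hB]
  rfl
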